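-- pv_equiv track=rewrite | github.com/lishilong8848/panorama | 外网端源码/handover_log_module/vendor/hvac_bitable_sync.py | weather_text
-- ===== SOURCE A (Python) =====
-- from typing import Any
--
-- WEATHER_CODE_TEXT = {
--     0: "晴",
--     1: "晴间多云",
--     2: "多云",
--     3: "阴",
--     45: "雾",
--     48: "雾",
--     51: "小毛毛雨",
--     53: "毛毛雨",
--     55: "较强毛毛雨",
--     56: "冻毛毛雨",
--     57: "冻毛毛雨",
--     61: "小雨",
--     63: "中雨",
--     65: "大雨",
--     66: "冻雨",
--     67: "冻雨",
--     71: "小雪",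
--     73: "中雪",
--     75: "大雪",
--     77: "雪粒",
--     80: "阵雨",
--     81: "较强阵雨",
--     82: "强阵雨",
--     85: "阵雪",
--     86: "强阵雪",
--     95: "雷阵雨",
--     96: "雷阵雨伴冰雹",
--     99: "强雷阵雨伴冰雹",
-- }
--
-- def weather_text(window: list[dict[str, Any]]) -> str:
--     codes = [item.get("weather_code") for item in window if item.get("weather_code") is not None]
--     if not codes:
--         return "天气情况未知"
--     severe_order = [99, 96, 95, 82, 86, 75, 67, 65, 63, 81, 80, 61, 53, 51, 3, 2, 1, 0]
--     code_set = set(codes)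
--     selected = next((code for code in severe_order if code in code_set), codes[0])
--     return f"天气以{WEATHER_CODE_TEXT.get(int(selected), '未知天气')}为主"
-- ===== SOURCE B (Python) =====
-- WEATHER_CODE_TEXT = {
--     0: "晴",
--     1: "晴间多云",
--     2: "多云",
--     3: "阴",
--     45: "雾",
--     48: "雾",
--     51: "小毛毛雨",
--     53: "毛毛雨",
--     55: "较强毛毛雨",
--     56: "冻毛毛雨",
--     57: "冻毛毛雨",
--     61: "小雨",
--     63: "中雨",
--     65: "大雨",
--     66: "冻雨",
--     67: "冻雨",
--     71: "小雪",
--     73: "中雪",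
--     75: "大雪",
--     77: "雪粒",
--     80: "阵雨",
--     81: "较强阵雨",
--     82: "强阵雨",
--     85: "阵雪",
--     86: "强阵雪",
--     95: "雷阵雨",
--     96: "雷阵雨伴冰雹",
--     99: "强雷阵雨伴冰雹",
-- }
--
-- SEVERE_ORDER = [99, 96, 95, 82, 86, 75, 67, 65, 63, 81, 80, 61, 53, 51, 3, 2, 1, 0]
--
-- def weather_text(window):
--     # ONE fused pass over the window: no intermediate codes list, no set.
--     first = None          # first non-None weather_code seen
--     seen = False
--     best_rank = None      # smallest severity rank seen so far
--     best_code = None      # its code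
--     for item in window:
--         c = item.get("weather_code")
--         if c is None:
--             continue
--         if not seen:
--             first, seen = c, True
--         if c in SEVERE_ORDER:
--             r = SEVERE_ORDER.index(c)
--             if best_rank is None or r < best_rank:
--                 best_rank, best_code = r, c
--     if not seen:
--         return "天气情况未知"
--     selected = first if best_rank is None else best_code
--     return f"天气以{WEATHER_CODE_TEXT.get(int(selected), '未知天气')}为主"
-- ===== Notes on version B (the rewrite author's own statement) =====
-- stated objective: alternative
-- what changed: A builds the code list, a set of present codes and scans the fixed severity list probing that set (first hit wins); B makes a single fused pass directly over the window, tracking the first code and the minimum-severity-rank code seen, with the same first-code fallback.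
import Mathlib
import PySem

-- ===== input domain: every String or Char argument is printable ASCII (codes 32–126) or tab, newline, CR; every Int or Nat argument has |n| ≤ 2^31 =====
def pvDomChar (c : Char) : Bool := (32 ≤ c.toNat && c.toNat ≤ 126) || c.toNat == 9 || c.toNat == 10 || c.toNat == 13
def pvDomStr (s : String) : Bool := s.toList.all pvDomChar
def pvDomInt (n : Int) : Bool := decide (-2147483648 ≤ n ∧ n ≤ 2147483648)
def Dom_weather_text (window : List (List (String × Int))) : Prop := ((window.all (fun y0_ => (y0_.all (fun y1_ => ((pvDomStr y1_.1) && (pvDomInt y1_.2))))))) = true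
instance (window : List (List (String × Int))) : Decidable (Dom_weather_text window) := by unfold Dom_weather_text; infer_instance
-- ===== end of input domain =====

-- B replaces A's three-stage pipeline (collect codes, build a set, scan the fixed severity list
-- probing it) by ONE fused recursion directly over the window that tracks the first code and the
-- minimum-severity-rank code seen; same first-code fallback, no intermediate list and no set.

-- shared module-level constant WEATHER_CODE_TEXT
def wcTextTable : PySem.Dict Int String := PySem.Dict.ofList
  [(0, "晴"), (1, "晴间多云"), (2, "多云"), (3, "阴"), (45, "雾"), (48, "雾"),
   (51, "小毛毛雨"), (53, "毛毛雨"), (55, "较强毛毛雨"), (56, "冻毛毛雨"), (57, "冻毛毛雨"),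
   (61, "小雨"), (63, "中雨"), (65, "大雨"), (66, "冻雨"), (67, "冻雨"),
   (71, "小雪"), (73, "中雪"), (75, "大雪"), (77, "雪粒"), (80, "阵雨"),
   (81, "较强阵雨"), (82, "强阵雨"), (85, "阵雪"), (86, "强阵雪"),
   (95, "雷阵雨"), (96, "雷阵雨伴冰雹"), (99, "强雷阵雨伴冰雹")]

-- the same literal list appears in A (severe_order) and in B (module constant SEVERE_ORDER)
def severeOrder : List Int := [99, 96, 95, 82, 86, 75, 67, 65, 63, 81, 80, 61, 53, 51, 3, 2, 1, 0]

-- ===== PORT A =====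
-- item.get("weather_code") on a Python dict given as an association list (first match)
def getWeatherCode (item : List (String × Int)) : Option Int :=
  (item.find? (fun p => p.1 == "weather_code")).map (·.2)

def weather_text (window : List (List (String × Int))) : String :=
  let codes := window.filterMap getWeatherCode
  match codes with
  | [] => "天气情况未知"
  | c0 :: _ =>
    let codeSet : PySem.Set Int := PySem.Set.ofList codes
    let selected := (severeOrder.find? (fun c => PySem.Set.contains codeSet c)).getD c0
    "天气以" ++ wcTextTable.getD selected "未知天气" ++ "为主"

-- ===== PORT B =====
-- the body of the `if c in SEVERE_ORDER: …` block: update (best_rank, best_code)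
def minStep (best : Option (Nat × Int)) (c : Int) : Option (Nat × Int) :=
  match PySem.List.index? severeOrder c with
  | none => best
  | some r =>
    match best with
    | none => some (r, c)
    | some (br, bc) => if r < br then (r, c) else (br, bc)

-- the fused `for item in window` loop, carrying (first, (best_rank, best_code))
def bLoop : List (List (String × Int)) → Option Int → Option (Nat × Int) →
    Option Int × Option (Nat × Int)
  | [], first, best => (first, best)
  | item :: rest, first, best =>
    match (item.find? (fun p => p.1 == "weather_code")).map (·.2) with
    | none => bLoop rest first best
    | some c =>
      bLoop rest (match first with | none => some c | some f => some f) (minStep best c)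

def weather_text_alt (window : List (List (String × Int))) : String :=
  match bLoop window none none with
  | (none, _) => "天气情况未知"
  | (some f, best) =>
    let selected := match best with | none => f | some (_, bc) => bc
    "天气以" ++ wcTextTable.getD selected "未知天气" ++ "为主"

-- ===== PRECONDITION & SPEC =====
def Spec_weather_text (window : List (List (String × Int))) (out : String) : Prop := out = weather_text_alt window
instance (window : List (List (String × Int))) (out : String) : Decidable (Spec_weather_text window out) := by unfold Spec_weather_text; infer_instance

-- ===== CLAIM =====
def Claim_equal_weather_text : Prop := ∀ (window : List (List (String × Int))), Dom_weather_text window → Spec_weather_text window (weather_text window)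

-- ===== LEMMAS AND PROOFS =====

-- index? severeOrder is injective on its hits, and every hit is < 18
theorem rk_lt {c : Int} {r : Nat} (h : PySem.List.index? severeOrder c = some r) : r < 18 := by
  obtain ⟨hk, -, -⟩ := PySem.List.getElem_of_index?_eq_some h
  simpa [severeOrder] using hk

theorem rk_inj {c c' : Int} {r : Nat} (h : PySem.List.index? severeOrder c = some r)
    (h' : PySem.List.index? severeOrder c' = some r) : c = c' := by
  obtain ⟨hk, hc, -⟩ := PySem.List.getElem_of_index?_eq_some h
  obtain ⟨hk', hc', -⟩ := PySem.List.getElem_of_index?_eq_some h'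
  rw [← hc, ← hc']

theorem rk_at : ∀ (t : Nat), t < severeOrder.length →
    PySem.List.index? severeOrder (severeOrder.getD t 0) = some t := by
  intro t ht
  have ht' : t < 18 := by simpa [severeOrder] using ht
  interval_cases t <;> decide

theorem minStep_of_none {acc : Option (Nat × Int)} {c : Int}
    (h : PySem.List.index? severeOrder c = none) : minStep acc c = acc := by
  rw [PySem.List.index?_eq_idxOf?] at h
  simp [minStep, h]

theorem fold_none : ∀ (codes : List Int) (acc : Option (Nat × Int)),
    codes.foldl minStep acc = none →
    acc = none ∧ ∀ c ∈ codes, PySem.List.index? severeOrder c = none := by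
  intro codes
  induction codes with
  | nil => intro acc h; exact ⟨h, by simp⟩
  | cons c cs ih =>
    intro acc h
    simp only [List.foldl_cons] at h
    obtain ⟨hstep, hcs⟩ := ih _ h
    have : acc = none ∧ PySem.List.index? severeOrder c = none := by
      cases hrc : PySem.List.index? severeOrder c with
      | none => rw [minStep_of_none hrc] at hstep; exact ⟨hstep, rfl⟩
      | some r =>
        exfalso
        have hstep' : minStep acc c = none := hstep
        unfold minStep at hstep'
        rw [hrc] at hstep'
        cases acc with
        | none => simp at hstep'
        | some p => obtain ⟨br, bc⟩ := p; simp at hstep'; split at hstep' <;> simp_all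
    refine ⟨this.1, ?_⟩
    intro x hx
    rcases List.mem_cons.mp hx with rfl | hx
    · exact this.2
    · exact hcs x hx

theorem minStep_of_some {acc : Option (Nat × Int)} {c : Int} {r : Nat}
    (h : PySem.List.index? severeOrder c = some r) :
    ∃ (dr : Nat) (d : Int), minStep acc c = some (dr, d) ∧ dr ≤ r ∧
      ((dr = r ∧ d = c) ∨ acc = some (dr, d)) ∧
      (∀ (ar : Nat) (a : Int), acc = some (ar, a) → dr ≤ ar) := by
  unfold minStep
  rw [h]
  cases acc with
  | none => exact ⟨r, c, rfl, le_refl r, Or.inl ⟨rfl, rfl⟩, by simp⟩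
  | some p =>
    obtain ⟨br, bc⟩ := p
    by_cases hlt : r < br
    · refine ⟨r, c, by simp [hlt], le_refl r, Or.inl ⟨rfl, rfl⟩, ?_⟩
      intro ar a h'
      simp at h'
      omega
    · refine ⟨br, bc, by simp [hlt], by omega, Or.inr rfl, ?_⟩
      intro ar a h'
      simp at h'
      omega

theorem fold_sound : ∀ (codes : List Int) (acc : Option (Nat × Int)) (br : Nat) (b : Int),
    codes.foldl minStep acc = some (br, b) →
    acc = some (br, b) ∨ (b ∈ codes ∧ PySem.List.index? severeOrder b = some br) := by
  intro codes
  induction codes with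
  | nil => intro acc br b h; exact Or.inl h
  | cons c cs ih =>
    intro acc br b h
    simp only [List.foldl_cons] at h
    rcases ih _ _ _ h with hstep | ⟨hb, hr⟩
    · cases hrc : PySem.List.index? severeOrder c with
      | none =>
        rw [minStep_of_none hrc] at hstep
        exact Or.inl hstep
      | some r =>
        obtain ⟨dr, d, hbs, -, hform, -⟩ := minStep_of_some (acc := acc) hrc
        rw [hbs] at hstep
        simp at hstep
        obtain ⟨rfl, rfl⟩ := hstep
        rcases hform with ⟨rfl, rfl⟩ | hacc
        · exact Or.inr ⟨List.mem_cons_self, hrc⟩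
        · exact Or.inl hacc
    · exact Or.inr ⟨List.mem_cons_of_mem _ hb, hr⟩

theorem fold_min : ∀ (codes : List Int) (acc : Option (Nat × Int)) (br : Nat) (b : Int),
    codes.foldl minStep acc = some (br, b) →
    (∀ c ∈ codes, ∀ r : Nat, PySem.List.index? severeOrder c = some r → br ≤ r) ∧
    (∀ (ar : Nat) (a : Int), acc = some (ar, a) → br ≤ ar) := by
  intro codes
  induction codes with
  | nil =>
    intro acc br b h
    refine ⟨by simp, ?_⟩
    intro ar a ha
    simp only [List.foldl_nil] at h
    rw [ha] at h
    simp at h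
    omega
  | cons c cs ih =>
    intro acc br b h
    simp only [List.foldl_cons] at h
    obtain ⟨Hcs, Hstep⟩ := ih _ _ _ h
    constructor
    · intro x hx r hr
      rcases List.mem_cons.mp hx with heq | hx
      · obtain ⟨dr, d, hbs, hdr, -, -⟩ := minStep_of_some (acc := acc) (heq ▸ hr)
        have := Hstep dr d hbs
        omega
      · exact Hcs x hx r hr
    · intro ar a hacc
      cases hrc : PySem.List.index? severeOrder c with
      | none =>
        exact Hstep ar a (by rw [minStep_of_none hrc, hacc])
      | some r =>
        obtain ⟨dr, d, hbs, -, -, hmono⟩ := minStep_of_some (acc := acc) hrc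
        have h1 := Hstep dr d hbs
        have h2 := hmono ar a hacc
        omega

theorem findG : ∀ (ord : List Int) (j : Nat) (codes : List Int) (br : Nat) (b : Int),
    b ∈ codes → PySem.List.index? severeOrder b = some br →
    (∀ c ∈ codes, ∀ r : Nat, PySem.List.index? severeOrder c = some r → br ≤ r) →
    (∀ (t : Nat), t < ord.length → PySem.List.index? severeOrder (ord.getD t 0) = some (j + t)) →
    j ≤ br → br < j + ord.length →
    ord.find? (fun s => decide (s ∈ codes)) = some b := by
  intro ord
  induction ord with
  | nil =>
    intro j codes br b _ _ _ _ hj hbound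
    simp at hbound
    omega
  | cons s rest ih =>
    intro j codes br b hb hrb hmin hord hj hbound
    have hs : PySem.List.index? severeOrder s = some j := by
      have := hord 0 (by simp)
      simpa using this
    by_cases hmem : s ∈ codes
    · have h1 : br ≤ j := hmin s hmem j hs
      have h2 : br = j := le_antisymm h1 hj
      have hbs : b = s := rk_inj hrb (show PySem.List.index? severeOrder s = some br by rw [hs, h2])
      rw [List.find?_cons_of_pos (by simpa using hmem)]
      rw [hbs]
    · rw [List.find?_cons_of_neg (by simpa using hmem)]
      have hne : j ≠ br := by
        intro hje
        have : b = s := rk_inj hrb (show PySem.List.index? severeOrder s = some br by rw [hs, hje])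
        exact hmem (this ▸ hb)
      refine ih (j + 1) codes br b hb hrb hmin ?_ (by omega) ?_
      · intro t ht
        have h2 := hord (t + 1) (by simp only [List.length_cons]; omega)
        simp only [List.getD_cons_succ] at h2
        rw [h2]
        congr 1
        omega
      · simp only [List.length_cons] at hbound
        omega

-- A's selection (severity scan over a set) equals B's (code of the minimum-rank fold)
theorem sel_eq (codes : List Int) (c0 : Int) :
    (severeOrder.find? (fun c => PySem.Set.contains (PySem.Set.ofList codes) c)).getD c0
      = (match codes.foldl minStep none with | none => c0 | some (_, bc) => bc) := by
  have hfun : (fun c => PySem.Set.contains (PySem.Set.ofList codes) c)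
      = (fun c => decide (c ∈ codes)) := by
    funext c
    by_cases hc : c ∈ codes <;> simp [hc]
  rw [hfun]
  cases hfold : codes.foldl minStep none with
  | none =>
    obtain ⟨-, hnone⟩ := fold_none codes none hfold
    have : severeOrder.find? (fun c => decide (c ∈ codes)) = none := by
      rw [List.find?_eq_none]
      intro s hs
      simp only [decide_eq_true_eq]
      intro hsc
      have h1 : s ∈ severeOrder := hs
      have h2 : s ∉ severeOrder := (PySem.List.index?_eq_none_iff _ _).mp (hnone s hsc)
      exact h2 h1
    rw [this]
    rfl
  | some p =>
    obtain ⟨br, bc⟩ := p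
    rcases fold_sound codes none br bc hfold with h | ⟨hb, hrb⟩
    · simp at h
    obtain ⟨hmin, -⟩ := fold_min codes none br bc hfold
    have h18 := rk_lt hrb
    have : severeOrder.find? (fun s => decide (s ∈ codes)) = some bc := by
      refine findG severeOrder 0 codes br bc hb hrb hmin ?_ (Nat.zero_le _) ?_
      · intro t ht
        simpa using rk_at t ht
      · simpa [severeOrder] using h18
    rw [this]
    rfl

-- combine two "first non-None" accumulators
def firstOr (f h : Option Int) : Option Int := match f with | none => h | some x => some x

theorem bLoop_spec : ∀ (w : List (List (String × Int))) (first : Option Int)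
    (best : Option (Nat × Int)),
    bLoop w first best
      = (firstOr first (w.filterMap getWeatherCode).head?,
         (w.filterMap getWeatherCode).foldl minStep best) := by
  intro w
  induction w with
  | nil =>
    intro first best
    simp only [bLoop, List.filterMap_nil, List.foldl_nil]
    cases first <;> rfl
  | cons item rest ih =>
    intro first best
    simp only [bLoop, List.filterMap_cons]
    cases hitem : getWeatherCode item with
    | none =>
      have : (item.find? (fun p => p.1 == "weather_code")).map (·.2) = none := hitem
      rw [this, ih]
    | some c =>
      have hfind : (item.find? (fun p => p.1 == "weather_code")).map (·.2) = some c := hitem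
      rw [hfind]
      simp only [List.head?_cons, List.foldl_cons]
      cases first <;> rw [ih] <;> rfl

-- ===== VERDICT =====
theorem weather_text_spec : Claim_equal_weather_text := by
  intro window _
  unfold Spec_weather_text weather_text weather_text_alt
  rw [bLoop_spec]
  cases hcodes : window.filterMap getWeatherCode with
  | nil => rfl
  | cons c0 rest =>
    simp only [List.head?_cons, firstOr]
    rw [sel_eq (c0 :: rest) c0]
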